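-- pv_equiv track=rewrite | github.com/codeforboston/boston-liquor-license-tracker | scraper/transform/scripts/extract_license_chunks.py | split_by_status
-- ===== SOURCE A (Python) =====
-- STATUS_KEYWORDS = [
--     "Granted",
--     "Deferred",
--     "Dismissed",
--     "No Action Taken",
--     "Defer",
--     "Dismiss",
--     "Revised",
--     "Corrected",
--     "Approved",
--     "Rejected",
--     "Denied",
-- ]
--
-- def split_by_status(lines):
--     """
--     Alternative chunking for multi-license chunks.
--     Splits the lines into sub-chunks based on STATUS_KEYWORDS.
--     """
--     sub_chunks = []
--     current_sub = []
--     for line in lines: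
--         current_sub.append(line)
--         lower_line = line.strip().lower()
--         # Check if line contains any status keyword as a whole word or significant phrase
--         found_status = False
--         for kw in STATUS_KEYWORDS:
--             if kw.lower() in lower_line:
--                 # Special case: "see old and new business" is handled in extract_hearings.py
--                 # but here we just look for terms that terminate a license description.
--                 # If we find a keyword, we finish this sub-chunk.
--                 found_status = True
--                 break
--
--         if found_status:
--             sub_chunks.append(current_sub)
--             current_sub = []
--
--     if current_sub:
--         sub_chunks.append(current_sub)
--     return sub_chunks
-- ===== SOURCE B (Python) =====
-- STATUS_KEYWORDS = [
--     "Granted",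
--     "Deferred",
--     "Dismissed",
--     "No Action Taken",
--     "Defer",
--     "Dismiss",
--     "Revised",
--     "Corrected",
--     "Approved",
--     "Rejected",
--     "Denied",
-- ]
--
-- _KW_LOWER = [kw.lower() for kw in STATUS_KEYWORDS]
--
--
-- def split_by_status(lines):
--     # Backward pass building the chunk list back-to-front: a status line always
--     # starts a fresh chunk (it is the last line of its chunk), any other line
--     # joins the chunk started after it, so no trailing-flush step is needed.
--     # Both levels are accumulated reversed (O(1) appends) and fixed at the end.
--     rev_chunks = []
--     for line in reversed(lines):
--         low = line.strip().lower()
--         if any(k in low for k in _KW_LOWER) or not rev_chunks: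
--             rev_chunks.append([line])
--         else:
--             rev_chunks[-1].append(line)
--     rev_chunks.reverse()
--     for chunk in rev_chunks:
--         chunk.reverse()
--     return rev_chunks
-- ===== Notes on version B (the rewrite author's own statement) =====
-- stated objective: alternative
-- what changed: Replaces A's forward accumulator (current_sub buffer, inner keyword loop with break, trailing flush) with a single backward pass that builds the chunk list back-to-front — a status line starts a fresh chunk, any other line joins the chunk after it — accumulated reversed with O(1) appends and fixed by final reversals, eliminating the trailing-chunk special case.
import Mathlib
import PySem

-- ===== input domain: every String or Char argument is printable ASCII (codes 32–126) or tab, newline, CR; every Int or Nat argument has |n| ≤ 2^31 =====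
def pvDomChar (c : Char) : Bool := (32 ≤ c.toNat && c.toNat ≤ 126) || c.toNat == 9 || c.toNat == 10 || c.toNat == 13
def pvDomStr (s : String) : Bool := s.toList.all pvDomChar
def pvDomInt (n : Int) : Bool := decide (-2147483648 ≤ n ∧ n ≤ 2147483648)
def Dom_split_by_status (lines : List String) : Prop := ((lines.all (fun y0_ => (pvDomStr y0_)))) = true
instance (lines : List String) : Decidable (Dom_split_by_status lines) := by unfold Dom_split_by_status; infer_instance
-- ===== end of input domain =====

-- B replaces A's forward accumulator-and-flush pass with a backward pass building the chunks back-to-front (alternative decomposition, same cost).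

-- ===== PORT A =====
def STATUS_KEYWORDS : List String :=
  ["Granted", "Deferred", "Dismissed", "No Action Taken", "Defer", "Dismiss",
   "Revised", "Corrected", "Approved", "Rejected", "Denied"]

-- A's inner `for kw in STATUS_KEYWORDS: if kw.lower() in lower_line: found_status = True; break`
def findStatusA (kws : List String) (lowerLine : String) : Bool :=
  match kws with
  | [] => false
  | kw :: rest =>
    if PySem.Str.isIn (PySem.Str.lower kw) lowerLine then true
    else findStatusA rest lowerLine

-- the body of A's `for line in lines` loop, on state (sub_chunks, current_sub)
def astepA (st : List (List String) × List String) (line : String) :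
    List (List String) × List String :=
  let current_sub := st.2 ++ [line]
  let lower_line := PySem.Str.lower (PySem.Str.strip line)
  let found_status := findStatusA STATUS_KEYWORDS lower_line
  if found_status then (st.1 ++ [current_sub], []) else (st.1, current_sub)

def split_by_status (lines : List String) : List (List String) :=
  let st := lines.foldl astepA ([], [])
  if st.2.isEmpty then st.1 else st.1 ++ [st.2]

-- ===== PORT B =====
-- Source B: _KW_LOWER = [kw.lower() for kw in STATUS_KEYWORDS]
def STATUS_KEYWORDS_LOWER : List String := STATUS_KEYWORDS.map PySem.Str.lower

-- the body of Source B's `for line in reversed(lines)` loop, on the doubly reversed accumulator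
def bstepB2 (chunks : List (List String)) (line : String) : List (List String) :=
  let low := PySem.Str.lower (PySem.Str.strip line)
  if STATUS_KEYWORDS_LOWER.any (fun k => PySem.Str.isIn k low) || chunks.isEmpty then
    chunks ++ [[line]]
  else
    chunks.dropLast ++ [(chunks.getLast?.getD []) ++ [line]]

def split_by_status_alt (lines : List String) : List (List String) :=
  let rev_chunks := lines.reverse.foldl bstepB2 []
  rev_chunks.reverse.map List.reverse

-- ===== PRECONDITION & SPEC =====
def Spec_split_by_status (lines : List String) (out : List (List String)) : Prop := out = split_by_status_alt lines
instance (lines : List String) (out : List (List String)) : Decidable (Spec_split_by_status lines out) := by unfold Spec_split_by_status; infer_instance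

-- ===== CLAIM (what is proved, stated in full; the proofs are below) =====
def Claim_equal_split_by_status : Prop := ∀ (lines : List String), Dom_split_by_status lines → Spec_split_by_status lines (split_by_status lines)

-- ===== LEMMAS AND PROOFS =====

-- the two keyword tests agree
theorem findStatusA_eq_any (kws : List String) (s : String) :
    findStatusA kws s = kws.any (fun kw => PySem.Str.isIn (PySem.Str.lower kw) s) := by
  induction kws with
  | nil => rfl
  | cons kw rest ih =>
    simp only [findStatusA, List.any_cons, ih]
    cases PySem.Str.isIn (PySem.Str.lower kw) s <;> simp

theorem hit_eq (line : String) :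
    findStatusA STATUS_KEYWORDS (PySem.Str.lower (PySem.Str.strip line))
      = STATUS_KEYWORDS_LOWER.any
          (fun k => PySem.Str.isIn k (PySem.Str.lower (PySem.Str.strip line))) := by
  rw [findStatusA_eq_any]
  simp only [STATUS_KEYWORDS_LOWER, List.any_map, Function.comp_def]

-- the back-to-front step of Source B in direct (unreversed) form, and the fold B computes
def bstepB (line : String) (chunks : List (List String)) : List (List String) :=
  if STATUS_KEYWORDS_LOWER.any
      (fun k => PySem.Str.isIn k (PySem.Str.lower (PySem.Str.strip line))) || chunks.isEmpty then
    [line] :: chunks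
  else
    (line :: chunks.headD []) :: chunks.tail

def altspec (lines : List String) : List (List String) := lines.foldr bstepB []

theorem bstep_rev (ch : List (List String)) (l : String) :
    (bstepB2 ch l).reverse.map List.reverse = bstepB l (ch.reverse.map List.reverse) := by
  induction ch using List.reverseRecOn with
  | nil => simp [bstepB2, bstepB]
  | append_singleton ds d _ =>
    simp only [bstepB2, bstepB]
    by_cases h : STATUS_KEYWORDS_LOWER.any
        (fun k => PySem.Str.isIn k (PySem.Str.lower (PySem.Str.strip l))) = true
    · rw [h]
      simp
    · rw [Bool.eq_false_iff.mpr h]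
      simp

theorem alt_eq_altspec (lines : List String) : split_by_status_alt lines = altspec lines := by
  simp only [split_by_status_alt, List.foldl_reverse, altspec]
  induction lines with
  | nil => rfl
  | cons l t ih =>
    rw [List.foldr_cons, List.foldr_cons, bstep_rev, ih]

-- A's final flush of `current_sub` into the chunks of the rest
def glue (cur : List String) (chunks : List (List String)) : List (List String) :=
  match chunks with
  | [] => if cur.isEmpty then [] else [cur]
  | c :: cs => (cur ++ c) :: cs

def finalize (st : List (List String) × List String) : List (List String) :=
  if st.2.isEmpty then st.1 else st.1 ++ [st.2]

theorem glue_nil (ch : List (List String)) : glue [] ch = ch := by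
  cases ch <;> simp [glue]

theorem glue_bstep (l : String) (cur : List String) (ch : List (List String))
    (hb : STATUS_KEYWORDS_LOWER.any
      (fun k => PySem.Str.isIn k (PySem.Str.lower (PySem.Str.strip l))) = false) :
    glue cur (bstepB l ch) = glue (cur ++ [l]) ch := by
  cases ch with
  | nil =>
    simp only [bstepB]
    simp [glue]
  | cons c cs =>
    simp only [bstepB]
    rw [hb]
    simp [glue]

theorem bstepB_of_hit (l : String) (ch : List (List String))
    (h : STATUS_KEYWORDS_LOWER.any
      (fun k => PySem.Str.isIn k (PySem.Str.lower (PySem.Str.strip l))) = true) :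
    bstepB l ch = [l] :: ch := by
  simp only [bstepB]
  rw [h]
  simp

theorem astepA_of_hit (st : List (List String) × List String) (l : String)
    (ha : findStatusA STATUS_KEYWORDS (PySem.Str.lower (PySem.Str.strip l)) = true) :
    astepA st l = (st.1 ++ [st.2 ++ [l]], []) := by
  simp only [astepA]
  rw [ha]
  rfl

theorem astepA_of_miss (st : List (List String) × List String) (l : String)
    (ha : findStatusA STATUS_KEYWORDS (PySem.Str.lower (PySem.Str.strip l)) = false) :
    astepA st l = (st.1, st.2 ++ [l]) := by
  simp only [astepA]
  rw [ha]
  rfl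

theorem alt_cons (l : String) (t : List String) :
    altspec (l :: t) = bstepB l (altspec t) := by
  simp only [altspec, List.foldr_cons]

theorem loop_invariant (rest : List String) :
    ∀ (acc : List (List String)) (cur : List String),
    finalize (rest.foldl astepA (acc, cur)) = acc ++ glue cur (altspec rest) := by
  induction rest with
  | nil =>
    intro acc cur
    by_cases h : cur.isEmpty <;>
      simp [finalize, altspec, glue, h]
  | cons l t ih =>
    intro acc cur
    rw [List.foldl_cons, alt_cons]
    by_cases h : STATUS_KEYWORDS_LOWER.any
        (fun k => PySem.Str.isIn k (PySem.Str.lower (PySem.Str.strip l))) = true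
    · have ha : findStatusA STATUS_KEYWORDS (PySem.Str.lower (PySem.Str.strip l)) = true := by
        rw [hit_eq]; exact h
      rw [astepA_of_hit, ih, glue_nil, bstepB_of_hit l _ h]
      · simp [glue]
      · exact ha
    · have hb : STATUS_KEYWORDS_LOWER.any
          (fun k => PySem.Str.isIn k (PySem.Str.lower (PySem.Str.strip l))) = false := by
        simpa using h
      have ha : findStatusA STATUS_KEYWORDS (PySem.Str.lower (PySem.Str.strip l)) = false := by
        rw [hit_eq]; exact hb
      rw [astepA_of_miss _ _ ha, ih, glue_bstep l cur _ hb]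

-- ===== VERDICT (by name: the statement is the Claim_ definition above) =====
theorem split_by_status_spec : Claim_equal_split_by_status := by
  intro lines _
  show split_by_status lines = split_by_status_alt lines
  have h := loop_invariant lines [] []
  simp only [finalize] at h
  rw [split_by_status, h, glue_nil, List.nil_append, alt_eq_altspec]
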